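-- pv_equiv track=rewrite | github.com/camelwater/Table-BOT | utils/wiimmfiUtils.py | check_repeat_times_slow
-- ===== SOURCE A (Python) =====
-- def check_repeat_times_slow(race, prev_races):
--     repetitions = {}
--     race = [(i[0], i[1]) for i in race]
--     prev_races = [[(i[0], i[1]) for i in r] for r in prev_races]
--
--     for i, r in enumerate(prev_races[::-1]):
--         cou = len([c for c in race if c in r])
--         if cou>0:
--             repetitions[i] = cou
--
--     try:
--         max_key = max(repetitions, key=repetitions.get)
--     except ValueError:
--         max_key = None
--
--     return (True, {'race': len(prev_races)-max_key, 'num_aff': repetitions[max_key]}) if max_key else (False, {})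
-- ===== SOURCE B (Python) =====
-- def check_repeat_times_slow(race, prev_races):
--     # Inverted index: player -> reversed-race indices in which the player appears,
--     # then per-index overlap counts in one pass over the current race; fixes A's
--     # `if max_key` slip (reversed index 0, the most recent race, is falsy in A).
--     inv = {}
--     for i, r in enumerate(reversed(prev_races)):
--         for q in {(p[0], p[1]) for p in r}:
--             inv.setdefault(q, []).append(i)
--     reps = {}
--     for p in race:
--         for i in inv.get((p[0], p[1]), ()):
--             reps[i] = reps.get(i, 0) + 1
--     if not reps:
--         return (False, {})
--     best = min(reps, key=lambda i: (-reps[i], i))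
--     return (True, {'race': len(prev_races) - best, 'num_aff': reps[best]})
-- ===== Notes on version B (the rewrite author's own statement) =====
-- stated objective: faster
-- what changed: Replaces A's per-previous-race membership scan over the current race with an inverted index (player -> reversed race indices) so the overlap counts are accumulated in one pass over the current race's players, the argmax then being the count-maximal smallest reversed index; A's `if max_key` truthiness slip is fixed and declared as D_.
-- intended difference: On inputs where the most recent previous race has a positive overlap count that is maximal among all previous races, Python's max() yields reversed index 0 and A's `if max_key` treats 0 as falsy, so A returns (False, {}); B returns (True, {'race': len(prev_races), 'num_aff': that count}), which is the intended result of an `is not None` check. — e.g. on check_repeat_times_slow([("a", "b")], [[("a", "b")]]): A returns (false, []), B returns (true, [("race", 1), ("num_aff", 1)])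
import Mathlib
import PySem

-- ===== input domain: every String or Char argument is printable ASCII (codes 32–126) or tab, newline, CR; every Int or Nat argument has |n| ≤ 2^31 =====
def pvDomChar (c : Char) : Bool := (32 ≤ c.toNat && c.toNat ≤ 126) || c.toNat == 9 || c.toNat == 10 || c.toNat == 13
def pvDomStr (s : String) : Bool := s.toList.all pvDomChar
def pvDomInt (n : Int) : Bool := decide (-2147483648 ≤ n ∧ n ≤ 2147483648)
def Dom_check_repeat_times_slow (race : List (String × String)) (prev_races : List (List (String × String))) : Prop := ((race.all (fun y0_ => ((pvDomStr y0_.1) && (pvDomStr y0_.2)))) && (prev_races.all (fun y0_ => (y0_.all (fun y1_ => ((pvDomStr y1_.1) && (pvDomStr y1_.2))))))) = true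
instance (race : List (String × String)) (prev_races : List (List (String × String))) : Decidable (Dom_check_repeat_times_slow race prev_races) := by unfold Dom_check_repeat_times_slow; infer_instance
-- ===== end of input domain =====

-- B replaces A's per-previous-race membership scan by an inverted index
-- player → reversed race indices, accumulating the overlap counts in one pass
-- over the current race, then takes the count-maximal, smallest reversed index;
-- A's `if max_key` slip (reversed index 0 is falsy) is fixed and declared as D_.

-- ===== PORT A =====
def check_repeat_times_slow (race : List (String × String)) (prev_races : List (List (String × String))) : Bool × (List (String × Int)) :=
  let race' := race.map (fun i => (i.1, i.2))
  let prev' := prev_races.map (fun r => r.map (fun i => (i.1, i.2)))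
  -- for i, r in enumerate(prev_races[::-1]):  (xs[::-1] is xs.reverse)
  let repetitions : PySem.Dict Int Int :=
    (PySem.List.enumerate prev'.reverse 0).foldl
      (fun d p =>
        let cou : Int := ((race'.filter (fun c => decide (c ∈ p.2))).length : Int)
        if cou > 0 then d.insert p.1 cou else d)
      PySem.Dict.empty
  -- max(repetitions, key=repetitions.get): first maximal key in insertion order;
  -- keys are always present so d.get(k) is d.getD k 0; empty dict raises → none.
  let max_key : Option Int := PySem.List.max? repetitions.keys (fun k => repetitions.getD k 0)
  match max_key with
  | none => (false, [])
  | some k =>          -- `if max_key`: None and 0 are falsy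
    if k ≠ 0 then (true, [("race", (prev'.length : Int) - k), ("num_aff", repetitions.getD k 0)])
    else (false, [])

-- ===== PORT B =====
-- inv: player -> list of reversed race indices (inv.setdefault(q, []).append(i)
-- is d.insert q (d.getD q [] ++ [i]): same contents and same key positions).
-- The inner loop runs over a Python set of the race's players; the set's hash
-- iteration order only permutes inv's key order, which B never consumes (inv is
-- only looked up afterwards), so the port is exact.
def pvInv (prev_races : List (List (String × String))) : PySem.Dict (String × String) (List Int) :=
  (PySem.List.enumerate prev_races.reverse 0).foldl
    (fun d ir =>
      (PySem.Set.ofList (ir.2.map (fun p => (p.1, p.2)))).foldl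
        (fun d q => d.insert q (d.getD q [] ++ [ir.1])) d)
    PySem.Dict.empty

-- reps: reversed index -> overlap count (reps[i] = reps.get(i, 0) + 1)
def pvReps (race : List (String × String)) (prev_races : List (List (String × String))) : PySem.Dict Int Int :=
  race.foldl
    (fun d p =>
      ((pvInv prev_races).getD (p.1, p.2) []).foldl
        (fun d i => d.insert i (d.getD i 0 + 1)) d)
    PySem.Dict.empty

def check_repeat_times_slow_alt (race : List (String × String)) (prev_races : List (List (String × String))) : Bool × (List (String × Int)) :=
  let reps := pvReps race prev_races
  if reps.size == 0 then (false, [])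
  else
    -- min(reps, key=lambda i: (-reps[i], i)) over the keys in insertion order
    match PySem.List.min2? reps.keys (fun i => -(reps.getD i 0)) (fun i => i) with
    | none => (false, [])   -- unreachable: reps is nonempty here
    | some best => (true, [("race", (prev_races.length : Int) - best), ("num_aff", reps.getD best 0)])

-- ===== PRECONDITION & SPEC =====
-- overlap count of the current race with one previous race (a function of the input only)
def pvCnt (race : List (String × String)) (r : List (String × String)) : Int :=
  (race.map (fun c => if c ∈ r then (1 : Int) else 0)).sum

-- On inputs where the most recent previous race has a positive overlap count that is
-- maximal among all previous races, Python's max() yields reversed index 0 and A's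
-- `if max_key` treats 0 as falsy, so A returns (False, {}); B returns
-- (True, {'race': len(prev_races), 'num_aff': that count}), the intended result.
def D_check_repeat_times_slow (race : List (String × String)) (prev_races : List (List (String × String))) : Prop :=
  prev_races ≠ [] ∧ 0 < pvCnt race (prev_races.getLastD []) ∧
    ∀ r ∈ prev_races, pvCnt race r ≤ pvCnt race (prev_races.getLastD [])
instance (race : List (String × String)) (prev_races : List (List (String × String))) : Decidable (D_check_repeat_times_slow race prev_races) := by unfold D_check_repeat_times_slow; infer_instance

def Spec_check_repeat_times_slow (race : List (String × String)) (prev_races : List (List (String × String))) (out : Bool × (List (String × Int))) : Prop := ¬ D_check_repeat_times_slow race prev_races → out = check_repeat_times_slow_alt race prev_races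
instance (race : List (String × String)) (prev_races : List (List (String × String))) (out : Bool × (List (String × Int))) : Decidable (Spec_check_repeat_times_slow race prev_races out) := by unfold Spec_check_repeat_times_slow; infer_instance

def pvDiffWitness_check_repeat_times_slow : (List (String × String)) × (List (List (String × String))) :=
  ([("a", "b")], [[("a", "b")]])
def pvDiffWitnessOut_check_repeat_times_slow : (Bool × (List (String × Int))) × (Bool × (List (String × Int))) :=
  ((false, []), (true, [("race", 1), ("num_aff", 1)]))

-- ===== CLAIM (what is proved, stated in full; the proofs are below) =====
def Claim_unchanged_check_repeat_times_slow : Prop := ∀ (race : List (String × String)) (prev_races : List (List (String × String))), Dom_check_repeat_times_slow race prev_races → Spec_check_repeat_times_slow race prev_races (check_repeat_times_slow race prev_races)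
def Claim_changed_check_repeat_times_slow : Prop := Dom_check_repeat_times_slow (pvDiffWitness_check_repeat_times_slow.1) (pvDiffWitness_check_repeat_times_slow.2) ∧ D_check_repeat_times_slow (pvDiffWitness_check_repeat_times_slow.1) (pvDiffWitness_check_repeat_times_slow.2) ∧ check_repeat_times_slow (pvDiffWitness_check_repeat_times_slow.1) (pvDiffWitness_check_repeat_times_slow.2) = pvDiffWitnessOut_check_repeat_times_slow.1 ∧ check_repeat_times_slow_alt (pvDiffWitness_check_repeat_times_slow.1) (pvDiffWitness_check_repeat_times_slow.2) = pvDiffWitnessOut_check_repeat_times_slow.2 ∧ pvDiffWitnessOut_check_repeat_times_slow.1 ≠ pvDiffWitnessOut_check_repeat_times_slow.2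
def Claim_exact_check_repeat_times_slow : Prop := ∀ (race : List (String × String)) (prev_races : List (List (String × String))), Dom_check_repeat_times_slow race prev_races → D_check_repeat_times_slow race prev_races → check_repeat_times_slow race prev_races ≠ check_repeat_times_slow_alt race prev_races

-- ===== LEMMAS AND PROOFS =====

theorem pvCnt_eq_countP (race r : List (String × String)) :
    pvCnt race r = (race.countP (fun c => decide (c ∈ r)) : Int) := by
  unfold pvCnt
  simpa using PySem.List.sum_map_ite_one_zero (fun c => decide (c ∈ r)) race

theorem pvCnt_eq_filter (race r : List (String × String)) :
    pvCnt race r = ((race.filter (fun c => decide (c ∈ r))).length : Int) := by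
  rw [pvCnt_eq_countP, List.countP_eq_length_filter]

def pvCs (race : List (String × String)) (prev_races : List (List (String × String))) : List Int :=
  prev_races.map (pvCnt race)

def pvRepsOf (race : List (String × String)) (prev_races : List (List (String × String))) : PySem.Dict Int Int :=
  (PySem.List.enumerate (pvCs race prev_races).reverse 0).foldl
    (fun d p => if p.2 > 0 then d.insert p.1 p.2 else d) PySem.Dict.empty

def pvGood (cs : List Int) (j : Nat) (c : Int) : Prop :=
  j < cs.length ∧ cs.getD j 0 = c ∧ 0 < c ∧ (∀ k, k < cs.length → cs.getD k 0 ≤ c) ∧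
    (∀ k, j < k → k < cs.length → cs.getD k 0 < c)

def pvLA (cs : List Int) : List (Int × Int) :=
  (PySem.List.enumerate cs.reverse 0).filter (fun p => decide (0 < p.2))

theorem pvEnumMap {α β : Type} (f : α → β) (l : List α) (s : Int) :
    PySem.List.enumerate (l.map f) s = (PySem.List.enumerate l s).map (fun p => (p.1, f p.2)) := by
  induction l generalizing s with
  | nil => simp [PySem.List.enumerate_nil]
  | cons x t ih => simp [PySem.List.enumerate_cons, ih]

theorem pvGood_unique {cs : List Int} {j j' : Nat} {c c' : Int}
    (h : pvGood cs j c) (h' : pvGood cs j' c') : j = j' ∧ c = c' := by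
  obtain ⟨hj, hv, hp, hle, hlt⟩ := h
  obtain ⟨hj', hv', hp', hle', hlt'⟩ := h'
  have hcc : c = c' := le_antisymm (hv ▸ hle' j hj) (hv' ▸ hle j' hj')
  constructor
  · rcases lt_trichotomy j j' with h1 | h1 | h1
    · have := hlt j' h1 hj'; omega
    · exact h1
    · have := hlt' j h1 hj; omega
  · exact hcc

theorem pvMaxAcc {α : Type} (key : α → Int) (xs : List α) : ∀ (a m : α),
    xs.foldl (fun acc x => match acc with
      | none => some x
      | some m => if key m < key x then some x else some m) (some a) = some m →
    (m = a ∧ ∀ y ∈ xs, key y ≤ key a) ∨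
    (∃ pre suf, xs = pre ++ m :: suf ∧ key a < key m ∧ (∀ y ∈ pre, key y < key m) ∧
      ∀ y ∈ suf, key y ≤ key m) := by
  induction xs with
  | nil => intro a m h; left; simp at h; simp [h]
  | cons x t ih =>
    intro a m h
    simp only [List.foldl_cons] at h
    by_cases hx : key a < key x
    · rw [if_pos hx] at h
      rcases ih x m h with ⟨rfl, hall⟩ | ⟨pre, suf, rfl, h1, h2, h3⟩
      · right; exact ⟨[], t, rfl, hx, by simp, hall⟩
      · right
        refine ⟨x :: pre, suf, rfl, lt_trans hx h1, ?_, h3⟩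
        intro y hy; rcases List.mem_cons.1 hy with rfl | hy
        · exact h1
        · exact h2 y hy
    · rw [if_neg hx] at h
      rcases ih a m h with ⟨rfl, hall⟩ | ⟨pre, suf, rfl, h1, h2, h3⟩
      · left; refine ⟨rfl, ?_⟩
        intro y hy; rcases List.mem_cons.1 hy with rfl | hy
        · omega
        · exact hall y hy
      · right
        refine ⟨x :: pre, suf, rfl, h1, ?_, h3⟩
        intro y hy; rcases List.mem_cons.1 hy with rfl | hy
        · omega
        · exact h2 y hy

theorem pvMax?_first {α : Type} (key : α → Int) (xs : List α) (m : α)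
    (h : PySem.List.max? xs key = some m) :
    ∃ pre suf, xs = pre ++ m :: suf ∧ (∀ y ∈ pre, key y < key m) ∧
      (∀ y ∈ xs, key y ≤ key m) := by
  cases xs with
  | nil => simp [PySem.List.max?] at h
  | cons x t =>
    have h' : t.foldl (fun acc x => match acc with
      | none => some x
      | some m => if key m < key x then some x else some m) (some x) = some m := by
      simpa [PySem.List.max?] using h
    rcases pvMaxAcc key t x m h' with ⟨rfl, hall⟩ | ⟨pre, suf, rfl, h1, h2, h3⟩
    · refine ⟨[], t, rfl, by simp, ?_⟩
      intro y hy; rcases List.mem_cons.1 hy with rfl | hy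
      · exact le_refl _
      · exact hall y hy
    · refine ⟨x :: pre, suf, rfl, ?_, ?_⟩
      · intro y hy; rcases List.mem_cons.1 hy with rfl | hy
        · exact h1
        · exact h2 y hy
      · intro y hy
        rcases List.mem_cons.1 hy with rfl | hy
        · omega
        · rcases List.mem_append.1 hy with hy | hy
          · exact le_of_lt (h2 y hy)
          · rcases List.mem_cons.1 hy with rfl | hy
            · exact le_refl _
            · exact h3 y hy

theorem pvDictFold (l : List Int) : ∀ (s : Int) (d : PySem.Dict Int Int),
    (∀ k ∈ d.keys, k < s) →
    ((PySem.List.enumerate l s).foldl (fun d p => if p.2 > 0 then d.insert p.1 p.2 else d) d).items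
      = d.items ++ (PySem.List.enumerate l s).filter (fun p => decide (0 < p.2)) := by
  induction l with
  | nil => intro s d _; simp [PySem.List.enumerate_nil]
  | cons a t ih =>
    intro s d hk
    rw [PySem.List.enumerate_cons]
    simp only [List.foldl_cons, List.filter_cons]
    by_cases ha : (0:Int) < a
    · have hnc : d.contains s = false := by
        by_contra h
        have h' : d.contains s = true := by revert h; cases d.contains s <;> simp
        have := hk s ((PySem.Dict.contains_iff_mem_keys d s).mp h')
        omega
      have hkeys : ∀ k ∈ (d.insert s a).keys, k < s + 1 := by
        intro k hkm
        rw [PySem.Dict.keys_insert_of_not_contains d a hnc] at hkm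
        rcases List.mem_append.1 hkm with h | h
        · have := hk k h; omega
        · simp at h; omega
      rw [if_pos (show (s, a).2 > 0 from ha),
        ih (s+1) (d.insert s a) hkeys, PySem.Dict.items_insert_of_not_contains d a hnc]
      simp [ha]
    · have hkeys : ∀ k ∈ d.keys, k < s + 1 := fun k h => by have := hk k h; omega
      rw [if_neg (show ¬ ((s, a).2 > 0) from ha), ih (s+1) d hkeys]
      simp [ha]

theorem pvLA_mem_iff (cs : List Int) (p : Int × Int) :
    p ∈ pvLA cs ↔ ∃ k : Nat, k < cs.length ∧ p = ((k : Int), cs.getD (cs.length - 1 - k) 0) ∧ 0 < p.2 := by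
  unfold pvLA
  rw [List.mem_filter]
  constructor
  · rintro ⟨hmem, hpos⟩
    rw [PySem.List.mem_enumerate_iff] at hmem
    obtain ⟨k, hk, rfl⟩ := hmem
    refine ⟨k, by simpa using hk, ?_, by simpa using hpos⟩
    have hk' : k < cs.length := by simpa using hk
    have : cs.reverse[k] = cs[cs.length - 1 - k] := List.getElem_reverse hk
    rw [List.getD_eq_getElem cs 0 (show cs.length - 1 - k < cs.length by omega)]
    simp [this]
  · rintro ⟨k, hk, hp, hpos⟩
    constructor
    · rw [PySem.List.mem_enumerate_iff]
      refine ⟨k, by simpa using hk, ?_⟩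
      rw [hp]
      have : cs.reverse[k]'(by simpa using hk) = cs[cs.length - 1 - k] := List.getElem_reverse (by simpa using hk)
      rw [List.getD_eq_getElem cs 0 (show cs.length - 1 - k < cs.length by omega)]
      simp [this]
    · simpa using hpos

theorem pvLA_keys_sorted (cs : List Int) : ((pvLA cs).map (·.1)).Pairwise (· < ·) := by
  rw [List.pairwise_map]
  exact List.Pairwise.filter _ (PySem.List.pairwise_lt_enumerate cs.reverse 0)

theorem pvAkey_none {cs : List Int} {d : PySem.Dict Int Int} (hitems : d.items = pvLA cs)
    (h : PySem.List.max? d.keys (fun k => d.getD k 0) = none) : ∀ c ∈ cs, c ≤ 0 := by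
  intro c hc
  rw [PySem.List.max?_eq_none_iff] at h
  by_contra hpos
  obtain ⟨k, hk, hck⟩ := List.mem_iff_getElem.1 (List.mem_reverse.2 hc)
  have hk' : k < cs.length := by simpa using hk
  have hmem : ((k : Int), c) ∈ pvLA cs := by
    rw [pvLA_mem_iff]
    refine ⟨k, hk', ?_, by simp; omega⟩
    have : cs.reverse[k] = cs[cs.length - 1 - k] := List.getElem_reverse hk
    rw [List.getD_eq_getElem cs 0 (show cs.length - 1 - k < cs.length by omega)]
    simp [← this, hck]
  have : (k : Int) ∈ d.keys := by
    show (k:Int) ∈ d.items.map (·.1)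
    rw [hitems]
    exact List.mem_map.2 ⟨_, hmem, rfl⟩
  rw [h] at this
  simp at this

theorem pvAkey_some {cs : List Int} {d : PySem.Dict Int Int} (hitems : d.items = pvLA cs)
    {m : Int} (h : PySem.List.max? d.keys (fun k => d.getD k 0) = some m) :
    ∃ K : Nat, K < cs.length ∧ m = (K : Int) ∧ pvGood cs (cs.length - 1 - K) (d.getD m 0) := by
  have hkeys : d.keys = (pvLA cs).map (·.1) := by
    show d.items.map (·.1) = _; rw [hitems]
  have hsort := pvLA_keys_sorted cs
  have hnd : d.keys.Nodup := by
    rw [hkeys]; exact hsort.imp (fun h => ne_of_lt h)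
  have hval : ∀ p ∈ pvLA cs, d.getD p.1 0 = p.2 := by
    intro p hp
    exact PySem.Dict.getD_of_mem_items d (by rw [hitems]; simpa using hp) hnd 0
  have hmemk : ∀ (q : Int × Int), q ∈ pvLA cs → q.1 ∈ d.keys := by
    intro q hq; rw [hkeys]; exact List.mem_map.2 ⟨_, hq, rfl⟩
  obtain ⟨pre, suf, hdec, hpre, hall⟩ := pvMax?_first (fun k => d.getD k 0) d.keys m h
  have hm_mem : m ∈ d.keys := by rw [hdec]; simp
  have hp : ∃ p ∈ pvLA cs, p.1 = m := by
    rw [hkeys] at hm_mem; simpa using List.mem_map.1 hm_mem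
  obtain ⟨p, hpLA, hp1⟩ := hp
  obtain ⟨K, hK, hpeq, hppos⟩ := (pvLA_mem_iff cs p).1 hpLA
  have hmK : m = (K : Int) := by rw [← hp1, hpeq]
  have hV : d.getD m 0 = cs.getD (cs.length - 1 - K) 0 := by
    rw [← hp1, hval p hpLA, hpeq]
  have hVpos : 0 < d.getD m 0 := by rw [← hp1, hval p hpLA]; exact hppos
  have hsortk : d.keys.Pairwise (· < ·) := by rw [hkeys]; exact hsort
  have hlt_keys : ∀ i ∈ d.keys, i < m → d.getD i 0 < d.getD m 0 := by
    intro i hi hilt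
    rw [hdec] at hi hsortk
    rcases List.mem_append.1 hi with hi | hi
    · exact hpre i hi
    · rcases List.mem_cons.1 hi with rfl | hi
      · omega
      · exfalso
        have := ((List.pairwise_append.1 hsortk).2.1)
        have := (List.pairwise_cons.1 this).1 i hi
        omega
  have hle_keys : ∀ i ∈ d.keys, d.getD i 0 ≤ d.getD m 0 := hall
  have hpair : ∀ k' : Nat, k' < cs.length → 0 < cs.getD k' 0 →
      (((cs.length - 1 - k' : Nat) : Int), cs.getD k' 0) ∈ pvLA cs := by
    intro k' hk' hkpos
    rw [pvLA_mem_iff]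
    refine ⟨cs.length - 1 - k', by omega, ?_, by simpa using hkpos⟩
    have : cs.length - 1 - (cs.length - 1 - k') = k' := by omega
    rw [this]
  refine ⟨K, hK, hmK, by omega, by rw [hV], hVpos, ?_, ?_⟩
  · intro k' hk'
    by_cases hkpos : 0 < cs.getD k' 0
    · have hq := hpair k' hk' hkpos
      have := hle_keys _ (hmemk _ hq)
      rw [hval _ hq] at this
      exact this
    · omega
  · intro k' hgt hk'
    by_cases hkpos : 0 < cs.getD k' 0
    · have hq := hpair k' hk' hkpos
      have hibound : ((cs.length - 1 - k' : Nat) : Int) < m := by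
        rw [hmK]
        have : cs.length - 1 - k' < K := by omega
        exact_mod_cast this
      have := hlt_keys _ (hmemk _ hq) hibound
      rw [hval _ hq] at this
      exact this
    · omega

theorem pvReps_items (race : List (String × String)) (prev_races : List (List (String × String))) :
    (pvRepsOf race prev_races).items = pvLA (pvCs race prev_races) := by
  unfold pvRepsOf pvLA
  rw [pvDictFold _ 0 PySem.Dict.empty (by simp [PySem.Dict.keys_empty])]
  rfl

theorem pvCs_mem_pos {cs : List Int} {j : Nat} {c : Int} (h : pvGood cs j c) :
    ¬ (∀ x ∈ cs, x ≤ 0) := by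
  obtain ⟨hj, hv, hp, _, _⟩ := h
  intro hall
  have : cs.getD j 0 ∈ cs := by
    rw [List.getD_eq_getElem _ _ hj]; exact List.getElem_mem _
  have := hall _ this
  omega

theorem pvCs_getD (race : List (String × String)) (prev_races : List (List (String × String)))
    (k : Nat) (hk : k < prev_races.length) :
    (pvCs race prev_races).getD k 0 = pvCnt race (prev_races[k]) := by
  unfold pvCs
  rw [List.getD_eq_getElem _ _ (by simpa using hk)]
  simp

theorem pvCs_last (race : List (String × String)) (prev_races : List (List (String × String)))
    (h : prev_races ≠ []) :
    (pvCs race prev_races).getD (prev_races.length - 1) 0 = pvCnt race (prev_races.getLastD []) := by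
  have hl : 0 < prev_races.length := List.length_pos_of_ne_nil h
  rw [pvCs_getD race prev_races _ (by omega)]
  congr 1
  rw [List.getLastD_eq_getLast?, List.getLast?_eq_getElem?,
    List.getElem?_eq_getElem (by omega)]
  rfl

theorem pvGood_iff_D (race : List (String × String)) (prev_races : List (List (String × String))) (c : Int) :
    pvGood (pvCs race prev_races) (prev_races.length - 1) c →
      D_check_repeat_times_slow race prev_races := by
  rintro ⟨hj, hv, hp, hle, _⟩
  have hlen : (pvCs race prev_races).length = prev_races.length := by unfold pvCs; simp
  have hl : 0 < prev_races.length := by omega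
  have hne : prev_races ≠ [] := List.ne_nil_of_length_pos hl
  have hlast := pvCs_last race prev_races hne
  refine ⟨hne, ?_, ?_⟩
  · rw [← hlast, hv]; exact hp
  · intro r hr
    obtain ⟨k, hk, rfl⟩ := List.mem_iff_getElem.1 hr
    have := hle k (by omega)
    rw [pvCs_getD race prev_races k hk] at this
    rw [← hlast, hv]
    exact this

theorem pvD_good (race : List (String × String)) (prev_races : List (List (String × String)))
    (h : D_check_repeat_times_slow race prev_races) :
    pvGood (pvCs race prev_races) (prev_races.length - 1) (pvCnt race (prev_races.getLastD [])) := by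
  obtain ⟨hne, hp, hle⟩ := h
  have hl : 0 < prev_races.length := List.length_pos_of_ne_nil hne
  have hlen : (pvCs race prev_races).length = prev_races.length := by unfold pvCs; simp
  refine ⟨by omega, ?_, hp, ?_, ?_⟩
  · exact pvCs_last race prev_races hne
  · intro k hk
    rw [pvCs_getD race prev_races k (by omega)]
    exact hle _ (List.getElem_mem _)
  · intro k h1 h2
    omega

theorem pvPortA_eq (race : List (String × String)) (prev_races : List (List (String × String))) :
    check_repeat_times_slow race prev_races =
      (match PySem.List.max? (pvRepsOf race prev_races).keys (fun k => (pvRepsOf race prev_races).getD k 0) with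
       | none => (false, [])
       | some k =>
         if k ≠ 0 then (true, [("race", (prev_races.length : Int) - k), ("num_aff", (pvRepsOf race prev_races).getD k 0)])
         else (false, [])) := by
  have heta1 : race.map (fun i => (i.1, i.2)) = race := by simp
  have heta2 : prev_races.map (fun r => r.map (fun i => (i.1, i.2))) = prev_races := by simp
  have hrep : (PySem.List.enumerate prev_races.reverse 0).foldl
      (fun d p => if ((race.filter (fun c => decide (c ∈ p.2))).length : Int) > 0
        then d.insert p.1 ((race.filter (fun c => decide (c ∈ p.2))).length : Int) else d)
      PySem.Dict.empty = pvRepsOf race prev_races := by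
    unfold pvRepsOf pvCs
    rw [← List.map_reverse, pvEnumMap, List.foldl_map]
    apply PySem.List.foldl_congr_mem
    intro acc x _
    simp only [pvCnt_eq_filter]
  unfold check_repeat_times_slow
  simp only [heta1, heta2]
  rw [hrep]

-- ===== B-side lemmas =====

theorem pvInnerSet (i : Int) (s : List (String × String)) :
    ∀ (d : PySem.Dict (String × String) (List Int)) (q' : String × String), s.Nodup →
    (s.foldl (fun d q => d.insert q (d.getD q [] ++ [i])) d).getD q' [] =
      d.getD q' [] ++ (if q' ∈ s then [i] else []) := by
  induction s with
  | nil => intro d q' _; simp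
  | cons x t ih =>
    intro d q' hnd
    obtain ⟨hx, ht⟩ := List.nodup_cons.1 hnd
    simp only [List.foldl_cons]
    rw [ih _ q' ht]
    by_cases hq : q' = x
    · subst hq
      rw [PySem.Dict.getD_insert_self]
      have : q' ∉ t := hx
      simp [this]
    · rw [PySem.Dict.getD_insert_of_ne _ _ _ hq]
      simp [hq]

theorem pvInvFold (L : List (Int × List (String × String))) :
    ∀ (d : PySem.Dict (String × String) (List Int)) (q : String × String),
    (L.foldl (fun d ir =>
        (PySem.Set.ofList (ir.2.map (fun p => (p.1, p.2)))).foldl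
          (fun d q => d.insert q (d.getD q [] ++ [ir.1])) d) d).getD q []
      = d.getD q [] ++ ((L.filter (fun ir => decide (q ∈ ir.2))).map (·.1)) := by
  induction L with
  | nil => intro d q; simp
  | cons ir t ih =>
    intro d q
    simp only [List.foldl_cons, List.filter_cons]
    rw [ih]
    rw [pvInnerSet ir.1 _ d q (PySem.Set.nodup_ofList _)]
    have hmem : (q ∈ PySem.Set.ofList (ir.2.map (fun p => (p.1, p.2)))) ↔ q ∈ ir.2 := by
      rw [PySem.Set.mem_ofList]; simp
    by_cases hq : q ∈ ir.2
    · rw [if_pos (hmem.2 hq)]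
      simp [hq]
    · rw [if_neg (fun h => hq (hmem.1 h))]
      simp [hq]

theorem pvInv_getD (prev_races : List (List (String × String))) (q : String × String) :
    (pvInv prev_races).getD q [] =
      (((PySem.List.enumerate prev_races.reverse 0).filter (fun ir => decide (q ∈ ir.2))).map (·.1)) := by
  unfold pvInv
  rw [pvInvFold]
  simp

theorem pvInv_mem (prev_races : List (List (String × String))) (q : String × String) (v : Int) :
    v ∈ (pvInv prev_races).getD q [] ↔
      ∃ k : Nat, k < prev_races.length ∧ v = (k : Int) ∧ q ∈ prev_races.reverse.getD k [] := by
  rw [pvInv_getD]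
  rw [List.mem_map]
  constructor
  · rintro ⟨p, hp, rfl⟩
    obtain ⟨hpm, hq⟩ := List.mem_filter.1 hp
    rw [PySem.List.mem_enumerate_iff] at hpm
    obtain ⟨k, hk, rfl⟩ := hpm
    have hk' : k < prev_races.length := by simpa using hk
    refine ⟨k, hk', by simp, ?_⟩
    rw [List.getD_eq_getElem _ _ (by simpa using hk')]
    simpa using hq
  · rintro ⟨k, hk, rfl, hq⟩
    refine ⟨((k : Int), prev_races.reverse[k]'(by simpa using hk)), ?_, rfl⟩
    rw [List.mem_filter]
    constructor
    · rw [PySem.List.mem_enumerate_iff]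
      exact ⟨k, by simpa using hk, by simp⟩
    · rw [List.getD_eq_getElem _ _ (by simpa using hk)] at hq
      simpa using hq

theorem pvInv_nodup (prev_races : List (List (String × String))) (q : String × String) :
    ((pvInv prev_races).getD q []).Nodup := by
  rw [pvInv_getD]
  have h := (PySem.List.pairwise_lt_enumerate prev_races.reverse 0).filter
    (fun ir => decide (q ∈ ir.2))
  have h2 : (((PySem.List.enumerate prev_races.reverse 0).filter
      (fun ir => decide (q ∈ ir.2))).map (·.1)).Pairwise (· < ·) := by
    rw [List.pairwise_map]; exact h
  exact h2.imp (fun h => ne_of_lt h)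

theorem pvRepsAux (g : (String × String) → List Int) (race : List (String × String)) :
    ∀ (d : PySem.Dict Int Int) (v : Int),
    (race.foldl (fun d p => (g p).foldl (fun d i => d.insert i (d.getD i 0 + 1)) d) d).getD v 0
      = d.getD v 0 + (race.map (fun p => ((g p).count v : Int))).sum := by
  induction race with
  | nil => intro d v; simp
  | cons p t ih =>
    intro d v
    simp only [List.foldl_cons, List.map_cons, List.sum_cons]
    rw [ih, PySem.Dict.getD_foldl_insert_add_one]
    ring

theorem pvReps_getD (race : List (String × String)) (prev_races : List (List (String × String))) (v : Int) :
    (pvReps race prev_races).getD v 0 =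
      (race.map (fun p => (((pvInv prev_races).getD (p.1, p.2) []).count v : Int))).sum := by
  unfold pvReps
  rw [pvRepsAux]
  simp

theorem pvCount_eq (race : List (String × String)) (prev_races : List (List (String × String)))
    (k : Nat) (hk : k < prev_races.length) :
    (pvReps race prev_races).getD (k : Int) 0 = pvCnt race (prev_races.reverse.getD k []) := by
  rw [pvReps_getD]
  unfold pvCnt
  congr 1
  apply List.map_congr_left
  intro p _
  have heta : ((p.1, p.2) : String × String) = p := rfl
  by_cases hq : p ∈ prev_races.reverse.getD k []
  · have hmem : (k : Int) ∈ (pvInv prev_races).getD (p.1, p.2) [] := by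
      rw [pvInv_mem]; exact ⟨k, hk, rfl, by rwa [heta]⟩
    rw [List.count_eq_one_of_mem (pvInv_nodup _ _) hmem, if_pos hq]
    norm_num
  · have hnmem : (k : Int) ∉ (pvInv prev_races).getD (p.1, p.2) [] := by
      rw [pvInv_mem]
      rintro ⟨k', hk', hkk, hq'⟩
      have : k' = k := by exact_mod_cast hkk.symm
      subst this
      rw [heta] at hq'
      exact hq hq'
    rw [List.count_eq_zero_of_not_mem hnmem, if_neg hq]
    norm_num

theorem pvRepsKeysAux (g : (String × String) → List Int) (race : List (String × String)) :
    ∀ (d : PySem.Dict Int Int),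
    (race.foldl (fun d p => (g p).foldl (fun d i => d.insert i (d.getD i 0 + 1)) d) d).keys
      = PySem.Set.update d.keys (race.flatMap g) := by
  induction race with
  | nil => intro d; simp [PySem.Set.update]
  | cons p t ih =>
    intro d
    simp only [List.foldl_cons, List.flatMap_cons]
    rw [ih, PySem.Dict.keys_foldl_insert, PySem.Set.update_append]

theorem pvReps_keys (race : List (String × String)) (prev_races : List (List (String × String))) :
    (pvReps race prev_races).keys =
      PySem.Set.ofList (race.flatMap (fun p => (pvInv prev_races).getD (p.1, p.2) [])) := by
  unfold pvReps
  rw [pvRepsKeysAux]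
  simp [PySem.Dict.keys_empty, PySem.Set.update_nil_left]

theorem pvReps_mem_keys (race : List (String × String)) (prev_races : List (List (String × String))) (v : Int) :
    v ∈ (pvReps race prev_races).keys ↔
      ∃ k : Nat, k < prev_races.length ∧ v = (k : Int) ∧
        0 < pvCnt race (prev_races.reverse.getD k []) := by
  rw [pvReps_keys, PySem.Set.mem_ofList, List.mem_flatMap]
  constructor
  · rintro ⟨p, hp, hv⟩
    rw [pvInv_mem] at hv
    obtain ⟨k, hk, rfl, hq⟩ := hv
    refine ⟨k, hk, rfl, ?_⟩
    rw [pvCnt_eq_countP]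
    have : 0 < race.countP (fun c => decide (c ∈ prev_races.reverse.getD k [])) := by
      rw [List.countP_pos_iff]
      exact ⟨p, hp, by simpa using hq⟩
    exact_mod_cast this
  · rintro ⟨k, hk, rfl, hpos⟩
    rw [pvCnt_eq_countP] at hpos
    have : 0 < race.countP (fun c => decide (c ∈ prev_races.reverse.getD k [])) := by exact_mod_cast hpos
    rw [List.countP_pos_iff] at this
    obtain ⟨p, hp, hq⟩ := this
    refine ⟨p, hp, ?_⟩
    rw [pvInv_mem]
    exact ⟨k, hk, rfl, by simpa using hq⟩

-- min2? characterisation (first lexicographic minimum; here keys are Int)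

theorem pvLexTrans {a b c d e f : Int}
    (h1 : a < c ∨ (a = c ∧ b ≤ d)) (h2 : c < e ∨ (c = e ∧ d ≤ f)) :
    a < e ∨ (a = e ∧ b ≤ f) := by
  rcases h1 with h1 | ⟨h1, h1'⟩ <;> rcases h2 with h2 | ⟨h2, h2'⟩
  · left; omega
  · left; omega
  · left; omega
  · right; exact ⟨by omega, by omega⟩

theorem pvMin2Acc (k1 k2 : Int → Int) (f : Option Int → Int → Option Int)
    (hf : ∀ (a x : Int), f (some a) x =
      if (decide (k1 x < k1 a) || !decide (k1 a < k1 x) && decide (k2 x < k2 a)) = true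
      then some x else some a)
    (xs : List Int) : ∀ (a m : Int), xs.foldl f (some a) = some m →
    (m = a ∨ m ∈ xs) ∧
      (k1 m < k1 a ∨ (k1 m = k1 a ∧ k2 m ≤ k2 a)) ∧
      (∀ y ∈ xs, k1 m < k1 y ∨ (k1 m = k1 y ∧ k2 m ≤ k2 y)) := by
  induction xs with
  | nil =>
    intro a m h
    simp at h
    subst h
    exact ⟨Or.inl rfl, Or.inr ⟨rfl, le_refl _⟩, by simp⟩
  | cons x t ih =>
    intro a m h
    rw [List.foldl_cons, hf a x] at h
    by_cases hc : k1 x < k1 a ∨ (¬ k1 a < k1 x ∧ k2 x < k2 a)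
    · have hcb : (decide (k1 x < k1 a) || !decide (k1 a < k1 x) && decide (k2 x < k2 a)) = true := by
        rcases hc with h1 | ⟨h1, h2⟩
        · simp [h1]
        · simp [h1, h2]
      rw [if_pos hcb] at h
      obtain ⟨hm, hx, hall⟩ := ih x m h
      have hxa : k1 x < k1 a ∨ (k1 x = k1 a ∧ k2 x ≤ k2 a) := by
        rcases hc with h1 | ⟨h1, h2⟩
        · left; exact h1
        · by_cases h3 : k1 x < k1 a
          · left; exact h3
          · right; exact ⟨by omega, le_of_lt h2⟩
      refine ⟨?_, pvLexTrans hx hxa, ?_⟩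
      · rcases hm with rfl | hm
        · right; exact List.mem_cons_self
        · right; exact List.mem_cons_of_mem _ hm
      · intro y hy
        rcases List.mem_cons.1 hy with rfl | hy
        · exact hx
        · exact hall y hy
    · have hcb : (decide (k1 x < k1 a) || !decide (k1 a < k1 x) && decide (k2 x < k2 a)) = false := by
        rcases not_or.1 hc with ⟨h1, h2⟩
        by_cases h3 : k1 a < k1 x
        · simp [h1, h3]
        · have h4 : ¬ k2 x < k2 a := fun h5 => h2 ⟨h3, h5⟩
          simp [h1, h3, h4]
      rw [hcb, if_neg (by simp)] at h
      obtain ⟨hm, ha, hall⟩ := ih a m h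
      rcases not_or.1 hc with ⟨h1, h2⟩
      have hax : k1 a < k1 x ∨ (k1 a = k1 x ∧ k2 a ≤ k2 x) := by
        by_cases h3 : k1 a < k1 x
        · left; exact h3
        · have h4 : ¬ k2 x < k2 a := fun h5 => h2 ⟨h3, h5⟩
          right; exact ⟨by omega, by omega⟩
      refine ⟨?_, ha, ?_⟩
      · rcases hm with rfl | hm
        · left; rfl
        · right; exact List.mem_cons_of_mem _ hm
      · intro y hy
        rcases List.mem_cons.1 hy with rfl | hy
        · exact pvLexTrans ha hax
        · exact hall y hy

theorem pvMin2_spec (k1 k2 : Int → Int) (xs : List Int) (m : Int)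
    (h : PySem.List.min2? xs k1 k2 = some m) :
    m ∈ xs ∧ ∀ y ∈ xs, k1 m < k1 y ∨ (k1 m = k1 y ∧ k2 m ≤ k2 y) := by
  cases xs with
  | nil => simp [PySem.List.min2?] at h
  | cons x t =>
    unfold PySem.List.min2? at h
    rw [List.foldl_cons] at h
    obtain ⟨hm, hx, hall⟩ := pvMin2Acc k1 k2 _ (fun a y => rfl) t x m h
    refine ⟨?_, ?_⟩
    · rcases hm with rfl | hm
      · exact List.mem_cons_self
      · exact List.mem_cons_of_mem _ hm
    · intro y hy
      rcases List.mem_cons.1 hy with rfl | hy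
      · exact hx
      · exact hall y hy

theorem pvMin2Aux (k1 k2 : Int → Int) (f : Option Int → Int → Option Int)
    (hf : ∀ (a x : Int), f (some a) x =
      if (decide (k1 x < k1 a) || !decide (k1 a < k1 x) && decide (k2 x < k2 a)) = true
      then some x else some a)
    (l : List Int) : ∀ (a : Int), ∃ m, l.foldl f (some a) = some m := by
  induction l with
  | nil => intro a; exact ⟨a, rfl⟩
  | cons y s ih =>
    intro a
    rw [List.foldl_cons, hf a y]
    by_cases hc : (decide (k1 y < k1 a) || !decide (k1 a < k1 y) && decide (k2 y < k2 a)) = true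
    · rw [if_pos hc]; exact ih y
    · rw [if_neg hc]; exact ih a

theorem pvMin2_isSome (k1 k2 : Int → Int) (x : Int) (t : List Int) :
    ∃ m, PySem.List.min2? (x :: t) k1 k2 = some m := by
  unfold PySem.List.min2?
  rw [List.foldl_cons]
  exact pvMin2Aux k1 k2 _ (fun a y => rfl) t x

theorem pvRevGetD (prev_races : List (List (String × String))) (K : Nat) (hK : K < prev_races.length) :
    prev_races.reverse.getD K [] = prev_races.getD (prev_races.length - 1 - K) [] := by
  rw [List.getD_eq_getElem _ _ (by simpa using hK),
      List.getD_eq_getElem _ _ (show prev_races.length - 1 - K < prev_races.length by omega)]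
  exact List.getElem_reverse (by simpa using hK)

theorem pvCs_rev (race : List (String × String)) (prev_races : List (List (String × String)))
    (K : Nat) (hK : K < prev_races.length) :
    (pvCs race prev_races).getD (prev_races.length - 1 - K) 0 =
      pvCnt race (prev_races.reverse.getD K []) := by
  rw [pvCs_getD race prev_races _ (by omega), pvRevGetD prev_races K hK]
  congr 1
  rw [List.getD_eq_getElem _ _ (show prev_races.length - 1 - K < prev_races.length by omega)]

theorem pvPortB_good (race : List (String × String)) (prev_races : List (List (String × String)))
    {best : Int}
    (h : PySem.List.min2? (pvReps race prev_races).keys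
        (fun i => -((pvReps race prev_races).getD i 0)) (fun i => i) = some best) :
    ∃ K : Nat, K < prev_races.length ∧ best = (K : Int) ∧
      pvGood (pvCs race prev_races) (prev_races.length - 1 - K)
        ((pvReps race prev_races).getD best 0) := by
  obtain ⟨hmem, hmin⟩ := pvMin2_spec _ _ _ _ h
  obtain ⟨K, hK, rfl, hpos⟩ := (pvReps_mem_keys race prev_races best).1 hmem
  have hlen : (pvCs race prev_races).length = prev_races.length := by unfold pvCs; simp
  have hval : (pvReps race prev_races).getD (K : Int) 0 =
      (pvCs race prev_races).getD (prev_races.length - 1 - K) 0 := by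
    rw [pvCount_eq race prev_races K hK, pvCs_rev race prev_races K hK]
  have hvpos : 0 < (pvReps race prev_races).getD (K : Int) 0 := by
    rw [pvCount_eq race prev_races K hK]; exact hpos
  refine ⟨K, hK, rfl, by omega, hval.symm, hvpos, ?_, ?_⟩
  · intro k' hk'
    have hk'' : k' < prev_races.length := by omega
    by_cases hkp : 0 < (pvCs race prev_races).getD k' 0
    · have hK' : prev_races.length - 1 - k' < prev_races.length := by omega
      have hidx : prev_races.length - 1 - (prev_races.length - 1 - k') = k' := by omega
      have hval' : (pvReps race prev_races).getD ((prev_races.length - 1 - k' : Nat) : Int) 0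
          = (pvCs race prev_races).getD k' 0 := by
        rw [pvCount_eq race prev_races _ hK', ← pvCs_rev race prev_races _ hK', hidx]
      have hmem' : ((prev_races.length - 1 - k' : Nat) : Int) ∈ (pvReps race prev_races).keys := by
        rw [pvReps_mem_keys]
        refine ⟨prev_races.length - 1 - k', hK', rfl, ?_⟩
        rw [← pvCs_rev race prev_races _ hK', hidx]
        exact hkp
      have := hmin _ hmem'
      rw [hval'] at this
      rcases this with h1 | ⟨h1, _⟩ <;> omega
    · omega
  · intro k' hgt hk'
    have hk'' : k' < prev_races.length := by omega
    by_cases hkp : 0 < (pvCs race prev_races).getD k' 0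
    · have hK' : prev_races.length - 1 - k' < prev_races.length := by omega
      have hidx : prev_races.length - 1 - (prev_races.length - 1 - k') = k' := by omega
      have hval' : (pvReps race prev_races).getD ((prev_races.length - 1 - k' : Nat) : Int) 0
          = (pvCs race prev_races).getD k' 0 := by
        rw [pvCount_eq race prev_races _ hK', ← pvCs_rev race prev_races _ hK', hidx]
      have hmem' : ((prev_races.length - 1 - k' : Nat) : Int) ∈ (pvReps race prev_races).keys := by
        rw [pvReps_mem_keys]
        refine ⟨prev_races.length - 1 - k', hK', rfl, ?_⟩
        rw [← pvCs_rev race prev_races _ hK', hidx]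
        exact hkp
      have hlt : prev_races.length - 1 - k' < K := by omega
      have hlt' : ¬ ((K : Int) ≤ ((prev_races.length - 1 - k' : Nat) : Int)) := by
        rw [not_le]
        exact_mod_cast hlt
      have := hmin _ hmem'
      rw [hval'] at this
      rcases this with h1 | ⟨h1, h2⟩
      · omega
      · exact absurd h2 hlt'
    · omega

theorem pvKeysNil_iff (race : List (String × String)) (prev_races : List (List (String × String))) :
    (pvReps race prev_races).keys = [] ↔ ∀ c ∈ pvCs race prev_races, c ≤ 0 := by
  have hlen : (pvCs race prev_races).length = prev_races.length := by unfold pvCs; simp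
  rw [List.eq_nil_iff_forall_not_mem]
  constructor
  · intro h c hc
    by_contra hpos
    obtain ⟨k, hk, hck⟩ := List.mem_iff_getElem.1 hc
    have hk' : k < prev_races.length := by omega
    apply h ((prev_races.length - 1 - k : Nat) : Int)
    rw [pvReps_mem_keys]
    refine ⟨prev_races.length - 1 - k, by omega, rfl, ?_⟩
    rw [← pvCs_rev race prev_races _ (by omega : prev_races.length - 1 - k < prev_races.length)]
    have hidx : prev_races.length - 1 - (prev_races.length - 1 - k) = k := by omega
    rw [hidx, List.getD_eq_getElem _ _ (by omega), hck]
    omega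
  · intro h v hv
    rw [pvReps_mem_keys] at hv
    obtain ⟨k, hk, rfl, hpos⟩ := hv
    have := h ((pvCs race prev_races).getD (prev_races.length - 1 - k) 0) (by
      rw [List.getD_eq_getElem _ _ (by omega)]
      exact List.getElem_mem _)
    rw [pvCs_rev race prev_races k hk] at this
    omega

theorem pvSizeZero_iff (race : List (String × String)) (prev_races : List (List (String × String))) :
    ((pvReps race prev_races).size == 0) = true ↔ (pvReps race prev_races).keys = [] := by
  have hsz : (pvReps race prev_races).size = (pvReps race prev_races).keys.length := by
    show (pvReps race prev_races).items.length = ((pvReps race prev_races).items.map (·.1)).length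
    rw [List.length_map]
  rw [hsz]
  simp [List.length_eq_zero_iff]

theorem pvMain (race : List (String × String)) (prev_races : List (List (String × String)))
    (hnD : ¬ D_check_repeat_times_slow race prev_races) :
    check_repeat_times_slow race prev_races = check_repeat_times_slow_alt race prev_races := by
  rw [pvPortA_eq]
  unfold check_repeat_times_slow_alt
  have hitems := pvReps_items race prev_races
  have hlen : (pvCs race prev_races).length = prev_races.length := by unfold pvCs; simp
  cases hm : PySem.List.max? (pvRepsOf race prev_races).keys (fun k => (pvRepsOf race prev_races).getD k 0) with
  | none =>
    have hall := pvAkey_none hitems hm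
    have hnil : (pvReps race prev_races).keys = [] := (pvKeysNil_iff race prev_races).2 hall
    rw [if_pos ((pvSizeZero_iff race prev_races).2 hnil)]
  | some m =>
    obtain ⟨K, hK, rfl, hgA⟩ := pvAkey_some hitems hm
    have hnall : ¬ (∀ x ∈ pvCs race prev_races, x ≤ 0) := pvCs_mem_pos hgA
    have hknil : (pvReps race prev_races).keys ≠ [] := by
      intro h; exact hnall ((pvKeysNil_iff race prev_races).1 h)
    have hsz : ¬ (((pvReps race prev_races).size == 0) = true) := by
      intro h; exact hknil ((pvSizeZero_iff race prev_races).1 h)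
    rw [if_neg hsz]
    obtain ⟨x, t, hxt⟩ := List.exists_cons_of_ne_nil hknil
    have hex : ∃ b, PySem.List.min2? (pvReps race prev_races).keys
        (fun i => -((pvReps race prev_races).getD i 0)) (fun i => i) = some b := by
      rw [hxt]
      exact pvMin2_isSome _ _ x t
    obtain ⟨best, hbest⟩ := hex
    rw [hbest]
    obtain ⟨K', hK', rfl, hgB⟩ := pvPortB_good race prev_races hbest
    have hgA' : pvGood (pvCs race prev_races) (prev_races.length - 1 - K)
        ((pvRepsOf race prev_races).getD (K : Int) 0) := by
      have : (pvCs race prev_races).length - 1 - K = prev_races.length - 1 - K := by omega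
      rwa [this] at hgA
    obtain ⟨hjj, hvv⟩ := pvGood_unique hgA' hgB
    have hKK : K = K' := by
      have h1 : K < prev_races.length := by omega
      omega
    subst hKK
    have hKne : K ≠ 0 := by
      intro h0
      apply hnD
      subst h0
      have : prev_races.length - 1 - 0 = prev_races.length - 1 := by omega
      rw [this] at hgA'
      exact pvGood_iff_D race prev_races _ hgA'
    have hKneI : (K : Int) ≠ 0 := by exact_mod_cast hKne
    show (if (K : Int) ≠ 0 then (true, [("race", (prev_races.length : Int) - (K : Int)), ("num_aff", (pvRepsOf race prev_races).getD (K : Int) 0)]) else (false, []))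
      = (true, [("race", (prev_races.length : Int) - (K : Int)), ("num_aff", (pvReps race prev_races).getD (K : Int) 0)])
    rw [if_pos hKneI, hvv]

theorem pvTight (race : List (String × String)) (prev_races : List (List (String × String)))
    (hD : D_check_repeat_times_slow race prev_races) :
    check_repeat_times_slow race prev_races ≠ check_repeat_times_slow_alt race prev_races := by
  rw [pvPortA_eq]
  unfold check_repeat_times_slow_alt
  have hitems := pvReps_items race prev_races
  have hlen : (pvCs race prev_races).length = prev_races.length := by unfold pvCs; simp
  have hgD := pvD_good race prev_races hD
  have hn : 0 < prev_races.length := List.length_pos_of_ne_nil hD.1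
  have hknil : (pvReps race prev_races).keys ≠ [] := by
    intro h
    exact pvCs_mem_pos hgD ((pvKeysNil_iff race prev_races).1 h)
  have hsz : ¬ (((pvReps race prev_races).size == 0) = true) := by
    intro h; exact hknil ((pvSizeZero_iff race prev_races).1 h)
  rw [if_neg hsz]
  obtain ⟨x, t, hxt⟩ := List.exists_cons_of_ne_nil hknil
  have hex : ∃ b, PySem.List.min2? (pvReps race prev_races).keys
      (fun i => -((pvReps race prev_races).getD i 0)) (fun i => i) = some b := by
    rw [hxt]
    exact pvMin2_isSome _ _ x t
  obtain ⟨best, hbest⟩ := hex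
  rw [hbest]
  cases hm : PySem.List.max? (pvRepsOf race prev_races).keys (fun k => (pvRepsOf race prev_races).getD k 0) with
  | none => exact absurd (pvAkey_none hitems hm) (pvCs_mem_pos hgD)
  | some m =>
    obtain ⟨K, hK, rfl, hgA⟩ := pvAkey_some hitems hm
    have hgA' : pvGood (pvCs race prev_races) (prev_races.length - 1 - K)
        ((pvRepsOf race prev_races).getD (K : Int) 0) := by
      have : (pvCs race prev_races).length - 1 - K = prev_races.length - 1 - K := by omega
      rwa [this] at hgA
    obtain ⟨hjj, _⟩ := pvGood_unique hgA' hgD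
    have hK0 : K = 0 := by omega
    subst hK0
    show (if ((0 : Nat) : Int) ≠ 0 then (true, [("race", (prev_races.length : Int) - ((0 : Nat) : Int)), ("num_aff", (pvRepsOf race prev_races).getD ((0 : Nat) : Int) 0)]) else (false, []))
      ≠ (true, [("race", (prev_races.length : Int) - best), ("num_aff", (pvReps race prev_races).getD best 0)])
    rw [if_neg (by simp)]
    simp

-- ===== VERDICT (by name: the statement is the Claim_ definition above) =====
theorem check_repeat_times_slow_spec : Claim_unchanged_check_repeat_times_slow := by
  intro race prev_races _ hnD
  exact pvMain race prev_races hnD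

theorem check_repeat_times_slow_changed : Claim_changed_check_repeat_times_slow := by
  unfold Claim_changed_check_repeat_times_slow; decide

theorem check_repeat_times_slow_tight : Claim_exact_check_repeat_times_slow := by
  intro race prev_races _ hD
  exact pvTight race prev_races hD
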